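-- pv_equiv track=rewrite | github.com/radioxInnovation/bddreporting | bddreporting/utils.py | extract_multiline_string
-- ===== SOURCE A (Python) =====
-- def extract_multiline_string(arr):
--     arr = arr if arr else []
--     in_multiline = False
--     result = []
--
--     for line in arr:
--         # Check for the first """
--         if '"""' in line and not in_multiline:
--             in_multiline = True
--             result.append(line.split('"""', 1)[-1])  # Append content after """
--         # Check for the second """
--         elif '"""' in line and in_multiline:
--             result.append(line.split('"""', 1)[0])  # Append content before """
--             break  # Stop after the second """
--         # Collect the lines between the """
--         elif in_multiline:
--             result.append(line)
--
--     # Join the result lines into a single string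
--     return "\n".join(result).strip()
-- ===== SOURCE B (Python) =====
-- def extract_multiline_string(arr):
--     lines = arr if arr else []
--     i = next((k for k, line in enumerate(lines) if '"""' in line), None)
--     if i is None:
--         return ""
--     opener = lines[i].split('"""', 1)[-1]
--     rest = lines[i + 1:]
--     j = next((k for k, line in enumerate(rest) if '"""' in line), None)
--     if j is None:
--         body = [opener] + rest
--     else:
--         body = [opener] + rest[:j] + [rest[j].split('"""', 1)[0]]
--     return "\n".join(body).strip()
-- ===== Notes on version B (the rewrite author's own statement) =====
-- stated objective: simpler
-- what changed: Replaces A's boolean in_multiline state flag with break by locate-then-slice: find the index of the first line containing triple quotes, then the first closing line after it, and build the result from explicit list slices.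
import Mathlib
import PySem

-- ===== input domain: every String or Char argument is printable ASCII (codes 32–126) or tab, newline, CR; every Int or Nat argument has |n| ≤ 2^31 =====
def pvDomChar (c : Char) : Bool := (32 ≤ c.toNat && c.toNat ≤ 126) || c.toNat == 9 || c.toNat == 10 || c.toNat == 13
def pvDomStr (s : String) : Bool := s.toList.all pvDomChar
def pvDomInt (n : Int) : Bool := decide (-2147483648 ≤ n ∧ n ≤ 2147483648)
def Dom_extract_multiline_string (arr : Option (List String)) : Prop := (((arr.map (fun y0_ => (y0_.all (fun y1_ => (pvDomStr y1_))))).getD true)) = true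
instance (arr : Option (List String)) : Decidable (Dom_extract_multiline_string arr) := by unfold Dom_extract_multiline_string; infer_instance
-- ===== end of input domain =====

-- B locates the opening/closing delimiter lines by index and slices, instead of A's boolean state flag with break (objective: simpler decomposition, same cost).

-- ===== PORT A =====
-- shared by both Pythons: the test '\"\"\" in line'
def pvHasTQ (l : String) : Bool := PySem.Str.isIn "\"\"\"" l
-- line.split('\"\"\"', 1)[0]
def pvSplitHead (l : String) : String := ((PySem.Str.splitMax? l "\"\"\"" 1).getD [l]).headD ""
-- line.split('\"\"\"', 1)[-1]
def pvSplitLast (l : String) : String := ((PySem.Str.splitMax? l "\"\"\"" 1).getD [l]).getLastD ""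

-- A's for-loop with state (in_multiline, result) and break
def pvALoop : List String → Bool → List String → List String
  | [], _, res => res
  | l :: ls, inml, res =>
    if pvHasTQ l && !inml then pvALoop ls true (res ++ [pvSplitLast l])
    else if pvHasTQ l && inml then res ++ [pvSplitHead l]
    else if inml then pvALoop ls inml (res ++ [l])
    else pvALoop ls inml res

def extract_multiline_string (arr : Option (List String)) : String :=
  PySem.Str.strip (PySem.Str.join "\n" (pvALoop (arr.getD []) false []))

-- ===== PORT B =====
def extract_multiline_string_alt (arr : Option (List String)) : String :=
  let lines := arr.getD []
  match lines.findIdx? pvHasTQ with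
  | none => ""
  | some i =>
    let opener := pvSplitLast (lines.getD i "")
    let rest := lines.drop (i + 1)
    let body : List String :=
      match rest.findIdx? pvHasTQ with
      | none => opener :: rest
      | some j => opener :: (rest.take j ++ [pvSplitHead (rest.getD j "")])
    PySem.Str.strip (PySem.Str.join "\n" body)

-- ===== PRECONDITION & SPEC =====
def Spec_extract_multiline_string (arr : Option (List String)) (out : String) : Prop := out = extract_multiline_string_alt arr
instance (arr : Option (List String)) (out : String) : Decidable (Spec_extract_multiline_string arr out) := by unfold Spec_extract_multiline_string; infer_instance

-- ===== CLAIM (what is proved, stated in full; the proofs are below) =====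
def Claim_equal_extract_multiline_string : Prop := ∀ (arr : Option (List String)), Dom_extract_multiline_string arr → Spec_extract_multiline_string arr (extract_multiline_string arr)

-- ===== LEMMAS AND PROOFS =====
lemma pvALoop_true (ls : List String) (res : List String) :
    pvALoop ls true res = res ++ (match ls.findIdx? pvHasTQ with
      | none => ls
      | some j => ls.take j ++ [pvSplitHead (ls.getD j "")]) := by
  induction ls generalizing res with
  | nil => simp [pvALoop]
  | cons l ls ih =>
    by_cases h : pvHasTQ l = true
    · simp [pvALoop, h, List.findIdx?_cons]
    · simp [pvALoop, h, List.findIdx?_cons, ih]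
      cases hf : ls.findIdx? pvHasTQ <;> simp

lemma pvALoop_false (ls : List String) (res : List String) :
    pvALoop ls false res = match ls.findIdx? pvHasTQ with
      | none => res
      | some i => pvALoop (ls.drop (i + 1)) true (res ++ [pvSplitLast (ls.getD i "")]) := by
  induction ls generalizing res with
  | nil => simp [pvALoop]
  | cons l ls ih =>
    by_cases h : pvHasTQ l = true
    · simp [pvALoop, h, List.findIdx?_cons]
    · simp [pvALoop, h, List.findIdx?_cons, ih]
      cases hf : ls.findIdx? pvHasTQ <;> simp

-- ===== VERDICT (by name: the statement is the Claim_ definition above) =====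
theorem extract_multiline_string_spec : Claim_equal_extract_multiline_string := by
  intro arr _
  unfold Spec_extract_multiline_string extract_multiline_string extract_multiline_string_alt
  rw [pvALoop_false]
  cases hf : (arr.getD []).findIdx? pvHasTQ with
  | none => simp only [hf]; decide
  | some i =>
    simp only [hf]
    rw [pvALoop_true]
    cases hg : ((arr.getD []).drop (i + 1)).findIdx? pvHasTQ <;> simp
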